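-- pv_equiv track=rewrite | github.com/charlespittman/advent_of_code | 2015/day_17/main.py | smallest_set_of_containers
-- ===== SOURCE A (Python) =====
-- from math import inf
--
-- def smallest_set_of_containers(
--     containers: list[tuple[int, ...]]
-- ) -> list[tuple[int, ...]]:
--     min_length = inf
--     for c in containers:
--         if len(c) <= min_length:
--             min_length = len(c)
--     return [c for c in containers if len(c) == min_length]
-- ===== SOURCE B (Python) =====
-- def smallest_set_of_containers(
--     containers: list[tuple[int, ...]]
-- ) -> list[tuple[int, ...]]:
--     best = None
--     result = []
--     for c in containers:
--         L = len(c)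
--         if best is None or L < best:
--             best = L
--             result = [c]
--         elif L == best:
--             result.append(c)
--     return result
-- ===== Notes on version B (the rewrite author's own statement) =====
-- stated objective: alternative
-- what changed: Replaces A's two passes (fold the minimum length, then filter) with a single online scan that maintains the current minimum length and the running group of containers attaining it.
import Mathlib
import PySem

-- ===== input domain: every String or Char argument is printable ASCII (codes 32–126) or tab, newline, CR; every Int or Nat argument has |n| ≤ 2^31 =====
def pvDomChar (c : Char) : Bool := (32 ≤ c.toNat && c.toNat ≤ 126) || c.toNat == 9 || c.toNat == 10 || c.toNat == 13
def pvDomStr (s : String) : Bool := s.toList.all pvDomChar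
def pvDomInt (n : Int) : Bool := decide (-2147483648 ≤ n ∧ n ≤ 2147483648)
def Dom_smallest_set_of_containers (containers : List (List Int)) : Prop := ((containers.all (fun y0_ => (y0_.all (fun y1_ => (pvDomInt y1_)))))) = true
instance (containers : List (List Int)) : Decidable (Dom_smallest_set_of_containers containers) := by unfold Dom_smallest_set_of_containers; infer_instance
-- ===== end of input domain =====

-- B replaces A's two passes (min, then filter) with one scan keeping the current best group; return value only, no mutation.

-- ===== PORT A =====
-- A's loop: min_length starts at inf (modelled as `none`); `len(c) <= inf` is true, so the
-- first element always sets it. The final comprehension compares len(c) == min_length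
-- (== inf is false, matching the `none => false` branch).
def smallest_set_of_containers (containers : List (List Int)) : List (List Int) :=
  let min_length := containers.foldl (fun m c =>
    match m with
    | none => some (c.length : Int)
    | some v => if (c.length : Int) ≤ v then some (c.length : Int) else some v) none
  containers.filter (fun c =>
    match min_length with
    | none => false
    | some v => (c.length : Int) == v)

-- ===== PORT B =====
-- B's loop state: (best, result); best = none is Python's `best is None`.
def pvAltStep (st : Option Int × List (List Int)) (c : List Int) : Option Int × List (List Int) :=
  let L : Int := c.length
  match st.1 with
  | none => (some L, [c])
  | some m =>
    if L < m then (some L, [c])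
    else if L == m then (st.1, st.2 ++ [c])
    else st

def smallest_set_of_containers_alt (containers : List (List Int)) : List (List Int) :=
  (containers.foldl pvAltStep (none, [])).2

-- ===== PRECONDITION & SPEC =====
def Spec_smallest_set_of_containers (containers : List (List Int)) (out : List (List Int)) : Prop := out = smallest_set_of_containers_alt containers
instance (containers : List (List Int)) (out : List (List Int)) : Decidable (Spec_smallest_set_of_containers containers out) := by unfold Spec_smallest_set_of_containers; infer_instance

-- ===== CLAIM (what is proved, stated in full; the proofs are below) =====
def Claim_equal_smallest_set_of_containers : Prop := ∀ (containers : List (List Int)), Dom_smallest_set_of_containers containers → Spec_smallest_set_of_containers containers (smallest_set_of_containers containers)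

-- ===== LEMMAS AND PROOFS =====

-- running minimum of the lengths, as a plain Int fold
def pvMin (m : Int) (l : List (List Int)) : Int :=
  l.foldl (fun v c => min v (c.length : Int)) m

theorem pvMin_le (m : Int) (l : List (List Int)) : pvMin m l ≤ m := by
  induction l generalizing m with
  | nil => simp [pvMin]
  | cons c t ih =>
      have := ih (min m (c.length : Int))
      simp only [pvMin, List.foldl] at *
      omega

-- A's fold from a `some` state is the running minimum
theorem foldA_some (l : List (List Int)) (m : Int) :
    l.foldl (fun m c =>
      match m with
      | none => some (c.length : Int)
      | some v => if (c.length : Int) ≤ v then some (c.length : Int) else some v) (some m)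
    = some (pvMin m l) := by
  induction l generalizing m with
  | nil => simp [pvMin]
  | cons c t ih =>
      simp only [List.foldl, pvMin] at *
      rw [show (if (c.length : Int) ≤ m then some ((c.length : Int)) else some m)
            = some (min m (c.length : Int)) by split_ifs with h <;> simp <;> omega]
      exact ih _

-- B's loop from a `some` state, characterised by the running minimum
theorem foldB_some (l : List (List Int)) (m : Int) (res : List (List Int)) :
    (l.foldl pvAltStep (some m, res)).2
      = (if pvMin m l < m then [] else res)
        ++ l.filter (fun c => (c.length : Int) == pvMin m l) := by
  induction l generalizing m res with
  | nil => simp [pvMin]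
  | cons c t ih =>
      have hle := pvMin_le (min m (c.length : Int)) t
      simp only [List.foldl, pvAltStep, pvMin] at *
      by_cases h1 : (c.length : Int) < m
      · simp only [if_pos h1]
        rw [ih]
        have hmin : min m (c.length : Int) = (c.length : Int) := by omega
        rw [hmin] at hle
        simp only [hmin]
        have hltm : t.foldl (fun v c => min v (c.length : Int)) (c.length : Int) < m := by omega
        by_cases h2 : t.foldl (fun v c => min v (c.length : Int)) (c.length : Int) < (c.length : Int)
        · simp [h2, hltm, List.filter,
            show ¬ ((c.length : Int) == t.foldl (fun v c => min v (c.length : Int)) (c.length : Int)) = true by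
              simp only [beq_iff_eq]; omega]
        · have heq : t.foldl (fun v c => min v (c.length : Int)) (c.length : Int) = (c.length : Int) := by omega
          simp [heq, List.filter]
          exact fun h => absurd h (by omega)
      · simp only [if_neg h1]
        have hmin : min m (c.length : Int) = m := by omega
        rw [hmin] at hle
        simp only [hmin]
        by_cases h2 : (c.length : Int) = m
        · rw [if_pos (by simp [h2] : ((c.length : Int) == m) = true)]
          rw [ih]
          by_cases h3 : t.foldl (fun v c => min v (c.length : Int)) m < m
          · simp [h3, List.filter,
              show ¬ ((c.length : Int) == t.foldl (fun v c => min v (c.length : Int)) m) = true by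
                simp only [beq_iff_eq]; omega]
          · have heq : t.foldl (fun v c => min v (c.length : Int)) m = m := by omega
            simp [heq, List.filter, h2]
        · rw [if_neg (by simp [h2] : ¬ ((c.length : Int) == m) = true)]
          rw [ih]
          simp [List.filter,
            show ¬ ((c.length : Int) == t.foldl (fun v c => min v (c.length : Int)) m) = true by
              simp only [beq_iff_eq]; omega]

-- ===== VERDICT (by name: the statement is the Claim_ definition above) =====
theorem smallest_set_of_containers_spec : Claim_equal_smallest_set_of_containers := by
  intro containers _
  unfold Spec_smallest_set_of_containers
  cases containers with
  | nil => rfl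
  | cons c t =>
      unfold smallest_set_of_containers smallest_set_of_containers_alt
      simp only [List.foldl, pvAltStep]
      rw [foldA_some, foldB_some]
      have hle := pvMin_le (c.length : Int) t
      by_cases h : pvMin (c.length : Int) t < (c.length : Int)
      · simp [h, List.filter, show ¬ ((c.length : Int) == pvMin (c.length : Int) t) = true by simp; omega]
      · have heq : pvMin (c.length : Int) t = (c.length : Int) := by omega
        simp [heq, List.filter]
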